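-- pv_equiv track=rewrite | github.com/Dharshika-112/Skill_Gap_Analyzer | backend/app/services/role_based_ml_scorer.py | _extract_education_level
-- ===== SOURCE A (Python) =====
-- def _extract_education_level(education_text: str) -> int:
--     """Extract education level from text"""
--     if not education_text:
--         return 2  # Default to bachelor's
--
--     education_lower = education_text.lower()
--
--     if any(term in education_lower for term in ['phd', 'doctorate', 'ph.d']):
--         return 4
--     elif any(term in education_lower for term in ['master', 'mba', 'm.tech', 'm.sc', 'ms']):
--         return 3
--     elif any(term in education_lower for term in ['bachelor', 'b.tech', 'b.sc', 'be', 'bs']):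
--         return 2
--     elif any(term in education_lower for term in ['diploma', 'associate']):
--         return 1
--     else:
--         return 2  # Default to bachelor's
-- ===== SOURCE B (Python) =====
-- _EDU_LEVELS = [
--     (4, ['phd', 'doctorate', 'ph.d']),
--     (3, ['master', 'mba', 'm.tech', 'm.sc', 'ms']),
--     (2, ['bachelor', 'b.tech', 'b.sc', 'be', 'bs']),
--     (1, ['diploma', 'associate']),
-- ]
--
--
-- def _contains_any(text, terms):
--     return any(term in text for term in terms)
--
--
-- def _extract_education_level(education_text: str) -> int:
--     """Extract education level from text"""
--     if not education_text:
--         return 2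
--
--     education_lower = education_text.lower()
--     matched = [level for level, terms in _EDU_LEVELS
--                if _contains_any(education_lower, terms)]
--     return max(matched) if matched else 2
-- ===== Notes on version B (the rewrite author's own statement) =====
-- stated objective: alternative
-- what changed: Replaces the early-exit if/elif chain by a data-driven table of (level, terms) groups: all groups are tested, matched levels collected into a list, and the maximum matched level (default 2) is returned.
import Mathlib
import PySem

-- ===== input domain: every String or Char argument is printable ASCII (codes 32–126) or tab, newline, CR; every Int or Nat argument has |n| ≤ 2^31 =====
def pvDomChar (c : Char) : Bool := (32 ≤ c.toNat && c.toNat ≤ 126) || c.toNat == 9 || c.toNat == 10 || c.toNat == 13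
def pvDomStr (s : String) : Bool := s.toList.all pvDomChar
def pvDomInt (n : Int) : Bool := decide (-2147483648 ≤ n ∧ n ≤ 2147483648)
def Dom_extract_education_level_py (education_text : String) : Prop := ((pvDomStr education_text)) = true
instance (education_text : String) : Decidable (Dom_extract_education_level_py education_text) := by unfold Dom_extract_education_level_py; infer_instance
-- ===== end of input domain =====

-- B replaces A's early-exit if/elif chain by a (level, terms) table: collect all matched
-- levels and return their maximum, default 2 (objective: alternative decomposition).

-- ===== PORT A =====
def extract_education_level_py (education_text : String) : Int :=
  if education_text == "" then 2
  else
    let education_lower := PySem.Str.lower education_text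
    if ["phd", "doctorate", "ph.d"].any (fun term => PySem.Str.isIn term education_lower) then 4
    else if ["master", "mba", "m.tech", "m.sc", "ms"].any (fun term => PySem.Str.isIn term education_lower) then 3
    else if ["bachelor", "b.tech", "b.sc", "be", "bs"].any (fun term => PySem.Str.isIn term education_lower) then 2
    else if ["diploma", "associate"].any (fun term => PySem.Str.isIn term education_lower) then 1
    else 2

-- ===== PORT B =====
def eduLevels : List (Int × List String) :=
  [(4, ["phd", "doctorate", "ph.d"]),
   (3, ["master", "mba", "m.tech", "m.sc", "ms"]),
   (2, ["bachelor", "b.tech", "b.sc", "be", "bs"]),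
   (1, ["diploma", "associate"])]

def containsAny (text : String) (terms : List String) : Bool :=
  terms.any (fun term => PySem.Str.isIn term text)

def extract_education_level_py_alt (education_text : String) : Int :=
  if education_text == "" then 2
  else
    let education_lower := PySem.Str.lower education_text
    let matched := (eduLevels.filter (fun g => containsAny education_lower g.2)).map (fun g => g.1)
    match PySem.List.max? matched (fun x => x) with
    | some m => m
    | none => 2

-- ===== PRECONDITION & SPEC =====
def Spec_extract_education_level_py (education_text : String) (out : Int) : Prop := out = extract_education_level_py_alt education_text
instance (education_text : String) (out : Int) : Decidable (Spec_extract_education_level_py education_text out) := by unfold Spec_extract_education_level_py; infer_instance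

-- ===== CLAIM (what is proved, stated in full; the proofs are below) =====
def Claim_equal_extract_education_level_py : Prop := ∀ (education_text : String), Dom_extract_education_level_py education_text → Spec_extract_education_level_py education_text (extract_education_level_py education_text)

-- ===== LEMMAS AND PROOFS =====

-- ===== VERDICT (by name: the statement is the Claim_ definition above) =====
theorem extract_education_level_py_spec : Claim_equal_extract_education_level_py := by
  intro s _
  unfold Spec_extract_education_level_py extract_education_level_py extract_education_level_py_alt
  by_cases h0 : s == ""
  · simp [h0]
  · simp only [h0, if_false, eduLevels, containsAny, List.filter_cons, List.filter_nil]
    cases h4 : (["phd", "doctorate", "ph.d"].any (fun term => PySem.Str.isIn term (PySem.Str.lower s))) <;>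
    cases h3 : (["master", "mba", "m.tech", "m.sc", "ms"].any (fun term => PySem.Str.isIn term (PySem.Str.lower s))) <;>
    cases h2 : (["bachelor", "b.tech", "b.sc", "be", "bs"].any (fun term => PySem.Str.isIn term (PySem.Str.lower s))) <;>
    cases h1 : (["diploma", "associate"].any (fun term => PySem.Str.isIn term (PySem.Str.lower s))) <;>
    simp [PySem.List.max?, PySem.List.max2?]
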